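-- pv_equiv track=rewrite | github.com/Longthor-VACHOUAXIONG/HaoXai | routes/sequence.py | trim_sequence_by_quality
-- ===== SOURCE A (Python) =====
-- def trim_sequence_by_quality(sequence, quality, threshold=20):
--     """Trim sequence ends based on quality threshold"""
--     if not quality or len(quality) != len(sequence):
--         return sequence, []
--
--     # Find first position with quality >= threshold
--     start = 0
--     for i, q in enumerate(quality):
--         if q >= threshold:
--             start = i
--             break
--
--     # Find last position with quality >= threshold
--     end = len(sequence)
--     for i in range(len(quality) - 1, -1, -1):
--         if quality[i] >= threshold:
--             end = i + 1
--             break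
--
--     return sequence[start:end], quality[start:end]
-- ===== SOURCE B (Python) =====
-- def trim_sequence_by_quality(sequence, quality, threshold=20):
--     """Trim sequence ends based on quality threshold (single accumulating pass)."""
--     if not quality or len(quality) != len(sequence):
--         return sequence, []
--     first = None
--     last = None
--     for i, q in enumerate(quality):
--         if q >= threshold:
--             if first is None:
--                 first = i
--             last = i
--     if first is None:
--         start, end = 0, len(sequence)
--     else:
--         start, end = first, last + 1
--     return sequence[start:end], quality[start:end]
-- ===== Notes on version B (the rewrite author's own statement) =====
-- stated objective: alternative
-- what changed: Replaces A's two early-exit scans (a forward scan for the first qualifying index and a separate backward scan over range(len-1,-1,-1) for the last) with a single forward pass that accumulates both the first and the last qualifying index, deriving start/end afterwards.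
import Mathlib
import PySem

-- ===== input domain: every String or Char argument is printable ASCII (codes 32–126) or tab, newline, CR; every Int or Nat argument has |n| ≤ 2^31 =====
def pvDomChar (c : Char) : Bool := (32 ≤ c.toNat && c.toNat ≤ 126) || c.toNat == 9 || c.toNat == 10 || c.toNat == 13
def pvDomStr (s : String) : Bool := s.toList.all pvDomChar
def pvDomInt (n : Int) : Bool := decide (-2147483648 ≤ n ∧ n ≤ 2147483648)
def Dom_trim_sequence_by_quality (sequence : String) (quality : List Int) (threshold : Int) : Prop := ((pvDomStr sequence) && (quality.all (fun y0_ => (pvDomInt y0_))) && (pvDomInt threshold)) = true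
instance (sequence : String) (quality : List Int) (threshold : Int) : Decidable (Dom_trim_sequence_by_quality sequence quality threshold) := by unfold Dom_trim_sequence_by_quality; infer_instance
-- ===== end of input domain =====

-- B replaces A's two early-exit scans (forward for start, backward for end) by ONE forward
-- pass accumulating the first and last qualifying indices; same cost, different decomposition.

-- ===== PORT A =====
-- forward loop: 'for i, q in enumerate(quality): if q >= threshold: start = i; break'
def aStartLoop (t : Int) : List Int → Nat → Int
  | [], _ => 0
  | q :: rest, i => if q ≥ t then (i : Int) else aStartLoop t rest (i + 1)

-- backward loop: 'for i in range(len(quality)-1, -1, -1): if quality[i] >= threshold: end = i+1; break'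
-- (structural countdown on the counter k = i+1; every index k-1 is in range, so getD is Python's quality[i])
def aEndLoop (t : Int) (quality : List Int) : Nat → Int → Int
  | 0, e => e
  | k + 1, e => if quality.getD k 0 ≥ t then ((k : Int) + 1) else aEndLoop t quality k e

def trim_sequence_by_quality (sequence : String) (quality : List Int) (threshold : Int) : String × List Int :=
  if quality = [] ∨ (quality.length : Int) ≠ PySem.Str.len sequence then (sequence, [])
  else
    let start := aStartLoop threshold quality 0
    let stop := aEndLoop threshold quality quality.length (PySem.Str.len sequence)
    (PySem.Str.slice sequence (some start) (some stop), PySem.List.slice quality (some start) (some stop))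

-- ===== PORT B =====
-- single forward pass: 'for i, q in enumerate(quality): if q >= threshold: first = first or i; last = i'
def bScanLoop (t : Int) : List Int → Nat → Option Nat → Option Nat → Option Nat × Option Nat
  | [], _, f, l => (f, l)
  | q :: rest, i, f, l =>
      if q ≥ t then bScanLoop t rest (i + 1) (if f = none then some i else f) (some i)
      else bScanLoop t rest (i + 1) f l

def trim_sequence_by_quality_alt (sequence : String) (quality : List Int) (threshold : Int) : String × List Int :=
  if quality = [] ∨ (quality.length : Int) ≠ PySem.Str.len sequence then (sequence, [])
  else
    let fl := bScanLoop threshold quality 0 none none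
    let se : Int × Int :=
      match fl.1, fl.2 with
      | some f, some l => ((f : Int), (l : Int) + 1)
      | _, _ => (0, PySem.Str.len sequence)
    (PySem.Str.slice sequence (some se.1) (some se.2), PySem.List.slice quality (some se.1) (some se.2))

-- ===== PRECONDITION & SPEC =====
def Spec_trim_sequence_by_quality (sequence : String) (quality : List Int) (threshold : Int) (out : String × List Int) : Prop := out = trim_sequence_by_quality_alt sequence quality threshold
instance (sequence : String) (quality : List Int) (threshold : Int) (out : String × List Int) : Decidable (Spec_trim_sequence_by_quality sequence quality threshold out) := by unfold Spec_trim_sequence_by_quality; infer_instance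

-- ===== CLAIM (what is proved, stated in full; the proofs are below) =====
def Claim_equal_trim_sequence_by_quality : Prop := ∀ (sequence : String) (quality : List Int) (threshold : Int), Dom_trim_sequence_by_quality sequence quality threshold → Spec_trim_sequence_by_quality sequence quality threshold (trim_sequence_by_quality sequence quality threshold)

-- ===== LEMMAS AND PROOFS =====

/-- first qualifying index of `q`, indices starting at `i` -/
def ffIdx (t : Int) : List Int → Nat → Option Nat
  | [], _ => none
  | q :: rest, i => if q ≥ t then some i else ffIdx t rest (i + 1)

/-- last qualifying index of `q`, indices starting at `i` -/
def lfIdx (t : Int) : List Int → Nat → Option Nat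
  | [], _ => none
  | q :: rest, i =>
      match lfIdx t rest (i + 1) with
      | some j => some j
      | none => if q ≥ t then some i else none

theorem aStartLoop_eq (t : Int) (qs : List Int) : ∀ i,
    aStartLoop t qs i = (match ffIdx t qs i with | some j => (j : Int) | none => 0) := by
  induction qs with
  | nil => intro i; rfl
  | cons q rest ih =>
      intro i
      simp only [aStartLoop, ffIdx]
      split_ifs with h
      · rfl
      · exact ih (i + 1)

theorem bScanLoop_fst_some (t : Int) (qs : List Int) : ∀ i a l,
    (bScanLoop t qs i (some a) l).1 = some a := by
  induction qs with
  | nil => intro i a l; rfl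
  | cons q rest ih =>
      intro i a l
      simp only [bScanLoop]
      by_cases h : q ≥ t <;> simp [h, ih]

theorem bScanLoop_fst_none (t : Int) (qs : List Int) : ∀ i l,
    (bScanLoop t qs i none l).1 = ffIdx t qs i := by
  induction qs with
  | nil => intro i l; rfl
  | cons q rest ih =>
      intro i l
      simp only [bScanLoop, ffIdx]
      by_cases h : q ≥ t
      · simp [h, bScanLoop_fst_some]
      · simp only [if_neg h]
        exact ih (i + 1) l

theorem bScanLoop_snd (t : Int) (qs : List Int) : ∀ i f l,
    (bScanLoop t qs i f l).2 = (match lfIdx t qs i with | some j => some j | none => l) := by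
  induction qs with
  | nil => intro i f l; rfl
  | cons q rest ih =>
      intro i f l
      simp only [bScanLoop, lfIdx]
      by_cases h : q ≥ t
      · simp only [if_pos h, ih]
        cases hr : lfIdx t rest (i + 1) <;> simp
      · simp only [if_neg h, ih]
        cases hr : lfIdx t rest (i + 1) <;> simp

theorem ff_none_iff_lf_none (t : Int) (qs : List Int) : ∀ i,
    ffIdx t qs i = none ↔ lfIdx t qs i = none := by
  induction qs with
  | nil => intro i; simp [ffIdx, lfIdx]
  | cons q rest ih =>
      intro i
      simp only [ffIdx, lfIdx]
      by_cases h : q ≥ t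
      · simp only [if_pos h]
        cases hr : lfIdx t rest (i + 1) <;> simp
      · simp only [if_neg h]
        cases hr : lfIdx t rest (i + 1) <;> simp [ih (i + 1), hr]

theorem lfIdx_snoc (t : Int) (qs : List Int) (a : Int) : ∀ i,
    lfIdx t (qs ++ [a]) i = if a ≥ t then some (i + qs.length) else lfIdx t qs i := by
  induction qs with
  | nil =>
      intro i
      simp only [List.nil_append, lfIdx]
      split_ifs with h <;> rfl
  | cons q rest ih =>
      intro i
      simp only [List.cons_append, lfIdx, ih (i + 1)]
      by_cases h : a ≥ t
      · simp only [if_pos h]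
        simp only [Option.some.injEq, List.length_cons]
        omega
      · simp only [if_neg h]

theorem aEndLoop_append (t : Int) (qs : List Int) (a : Int) (e : Int) : ∀ k, k ≤ qs.length →
    aEndLoop t (qs ++ [a]) k e = aEndLoop t qs k e := by
  intro k
  induction k with
  | zero => intro _; rfl
  | succ k ih =>
      intro hk
      have hlt : k < qs.length := by omega
      simp only [aEndLoop]
      have : (qs ++ [a]).getD k 0 = qs.getD k 0 := by
        simp [List.getD, List.getElem?_append_left hlt]
      rw [this]
      split_ifs with h
      · rfl
      · exact ih (by omega)

theorem aEndLoop_eq (t : Int) (qs : List Int) (e : Int) :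
    aEndLoop t qs qs.length e = (match lfIdx t qs 0 with | some j => (j : Int) + 1 | none => e) := by
  induction qs using List.reverseRecOn with
  | nil => rfl
  | append_singleton qs a ih =>
      have hlen : (qs ++ [a]).length = qs.length + 1 := by simp
      rw [hlen]
      simp only [aEndLoop]
      have hget : (qs ++ [a]).getD qs.length 0 = a := by
        simp [List.getD]
      rw [hget, lfIdx_snoc]
      split_ifs with h
      · simp
      · rw [aEndLoop_append t qs a e qs.length le_rfl, ih]

-- ===== VERDICT (by name: the statement is the Claim_ definition above) =====
theorem trim_sequence_by_quality_spec : Claim_equal_trim_sequence_by_quality := by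
  intro sequence quality threshold _
  unfold Spec_trim_sequence_by_quality trim_sequence_by_quality trim_sequence_by_quality_alt
  split_ifs with hguard
  · rfl
  · simp only
    rw [aStartLoop_eq, aEndLoop_eq, bScanLoop_fst_none, bScanLoop_snd]
    cases hf : ffIdx threshold quality 0 with
    | none =>
        have hl : lfIdx threshold quality 0 = none := (ff_none_iff_lf_none threshold quality 0).mp hf
        simp [hl]
    | some f =>
        cases hl : lfIdx threshold quality 0 with
        | none =>
            exact absurd ((ff_none_iff_lf_none threshold quality 0).mpr hl) (by simp [hf])
        | some l => simp
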